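-- pv_equiv track=rewrite | github.com/somendrat22/python-interview-prep-guide | 01_DSA_Python/02_Arrays/problems_easy.py | left_rotate_inplace
-- ===== SOURCE A (Python) =====
-- def left_rotate_inplace(arr, k):
--     """
--     Reverse trick:
--     1. Reverse first k elements
--     2. Reverse remaining elements
--     3. Reverse entire array
--
--     Example: [1, 2, 3, 4, 5], k=2
--     Step 1: Reverse [1,2]     → [2, 1, 3, 4, 5]
--     Step 2: Reverse [3,4,5]   → [2, 1, 5, 4, 3]
--     Step 3: Reverse all       → [3, 4, 5, 1, 2] ✓
--     """
--     def reverse(arr, start, end):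
--         while start < end:
--             arr[start], arr[end] = arr[end], arr[start]
--             start += 1
--             end -= 1
--
--     n = len(arr)
--     k = k % n
--
--     reverse(arr, 0, k - 1)        # reverse first k
--     reverse(arr, k, n - 1)        # reverse rest
--     reverse(arr, 0, n - 1)        # reverse all
--
--     return arr
-- ===== SOURCE B (Python) =====
-- def left_rotate_inplace(arr, k):
--     k %= len(arr)
--     arr[:] = arr[k:] + arr[:k]
--     return arr
-- ===== Notes on version B (the rewrite author's own statement) =====
-- stated objective: simpler
-- what changed: Replaces the three in-place segment-reversal passes with a single slice concatenation assigned back via arr[:] (same in-place mutation, same ZeroDivisionError on empty arr).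
import Mathlib
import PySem

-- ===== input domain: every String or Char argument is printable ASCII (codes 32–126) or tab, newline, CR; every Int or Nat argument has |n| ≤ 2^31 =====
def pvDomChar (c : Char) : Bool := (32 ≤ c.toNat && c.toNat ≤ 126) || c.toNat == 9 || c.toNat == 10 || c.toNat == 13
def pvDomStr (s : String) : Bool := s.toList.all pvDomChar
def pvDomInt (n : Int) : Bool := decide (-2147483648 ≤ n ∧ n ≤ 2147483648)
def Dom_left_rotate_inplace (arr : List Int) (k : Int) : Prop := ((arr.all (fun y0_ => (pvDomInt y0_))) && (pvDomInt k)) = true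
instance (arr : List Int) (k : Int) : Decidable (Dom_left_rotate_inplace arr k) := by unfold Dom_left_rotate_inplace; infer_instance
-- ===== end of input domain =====

-- B replaces A's three in-place segment reversals by one slice concatenation assigned back
-- through arr[:] (so B performs the same in-place mutation of the argument as A, and keeps
-- k % len(arr)); the equivalence proved here is about the return value.

-- ===== PORT A =====
-- inner helper 'reverse(arr, start, end)': swap loop; indices are always in range when
-- called by left_rotate_inplace on a non-empty arr (the 'none' branch is unreachable there)
def revSegA (arr : List Int) (s e : Int) : List Int :=
  if s < e then
    match PySem.List.pyGet? arr s, PySem.List.pyGet? arr e with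
    | some a, some b =>
        revSegA (PySem.List.pySetD (PySem.List.pySetD arr s b) e a) (s + 1) (e - 1)
    | _, _ => arr
  else arr
termination_by (e - s).toNat
decreasing_by simp; omega

def left_rotate_inplace (arr : List Int) (k : Int) : List Int :=
  let n : Int := arr.length
  -- Python raises ZeroDivisionError at 'k % n' when n = 0; excluded by Pre_ (guard only for totality)
  if n = 0 then arr else
  let k' := PySem.Int.mod k n
  let a1 := revSegA arr 0 (k' - 1)
  let a2 := revSegA a1 k' (n - 1)
  revSegA a2 0 (n - 1)

-- ===== PORT B =====
def left_rotate_inplace_alt (arr : List Int) (k : Int) : List Int :=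
  -- 'k %= len(arr)' raises on empty arr (excluded by Pre_); guard only for totality
  if (arr.length : Int) = 0 then arr else
  let k' := PySem.Int.mod k (arr.length : Int)
  PySem.List.slice arr (some k') none ++ PySem.List.slice arr none (some k')

-- ===== PRECONDITION & SPEC =====
-- Pre_ excludes exactly the empty list, on which Python A raises ZeroDivisionError (k % 0)
def Pre_left_rotate_inplace (arr : List Int) (k : Int) : Prop := arr ≠ []
instance (arr : List Int) (k : Int) : Decidable (Pre_left_rotate_inplace arr k) := by
  unfold Pre_left_rotate_inplace; infer_instance

def pvWitness_left_rotate_inplace : List Int × Int := ([1, 2, 3, 4, 5], 2)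

def Spec_left_rotate_inplace (arr : List Int) (k : Int) (out : List Int) : Prop := out = left_rotate_inplace_alt arr k
instance (arr : List Int) (k : Int) (out : List Int) : Decidable (Spec_left_rotate_inplace arr k out) := by unfold Spec_left_rotate_inplace; infer_instance

-- ===== CLAIM (what is proved, stated in full; the proofs are below) =====
def Claim_equal_left_rotate_inplace : Prop := ∀ (arr : List Int) (k : Int), Dom_left_rotate_inplace arr k → Pre_left_rotate_inplace arr k → Spec_left_rotate_inplace arr k (left_rotate_inplace arr k)

-- ===== LEMMAS AND PROOFS =====

theorem revSegA_length (arr : List Int) (s e : Int) :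
    (revSegA arr s e).length = arr.length := by
  fun_induction revSegA arr s e with
  | case1 arr s e h a b hb ha ih => simpa [PySem.List.length_pySetD] using ih
  | case2 => rfl
  | case3 => rfl

-- pointwise characterisation of the swap loop: the segment [s, e] is reversed
theorem revSegA_getD (arr : List Int) (s e : Int) :
    0 ≤ s → e < arr.length → ∀ i : Nat,
    (revSegA arr s e).getD i 0 =
      if s ≤ (i : Int) ∧ (i : Int) ≤ e then arr.getD (s + e - i).toNat 0 else arr.getD i 0 := by
  fun_induction revSegA arr s e with
  | case1 arr s e h a b hb ha ih =>
    intro h0 h2 i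
    have hsn : s.toNat < arr.length := by omega
    have hen : e.toNat < arr.length := by omega
    have he0 : (0:Int) ≤ e := by omega
    rw [PySem.List.pyGet?_of_nonneg _ h0] at ha
    rw [PySem.List.pyGet?_of_nonneg _ he0] at hb
    rw [List.getElem?_eq_getElem hsn] at ha
    rw [List.getElem?_eq_getElem hen] at hb
    have ha' : a = arr[s.toNat] := by injection ha; omega
    have hb' : b = arr[e.toNat] := by injection hb; omega
    rw [PySem.List.pySetD_of_nonneg _ _ h0, PySem.List.pySetD_of_nonneg _ _ he0] at ih
    have hL : ∀ j : Nat, ((arr.set s.toNat b).set e.toNat a).getD j 0 =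
        if j = e.toNat then a else if j = s.toNat then b else arr.getD j 0 := by
      intro j
      simp only [List.getD]
      by_cases j1 : j = e.toNat
      · subst j1
        rw [if_pos rfl, List.getElem?_set_self (by simpa using hen)]
        rfl
      · rw [if_neg j1, List.getElem?_set_ne (by omega)]
        by_cases j2 : j = s.toNat
        · subst j2
          rw [if_pos rfl, List.getElem?_set_self hsn]
          rfl
        · rw [if_neg j2, List.getElem?_set_ne (by omega)]
    rw [PySem.List.pySetD_of_nonneg _ _ h0, PySem.List.pySetD_of_nonneg _ _ he0,
        ih (by omega) (by simp; omega) i]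
    subst ha' hb'
    by_cases hc : s ≤ (i : Int) ∧ (i : Int) ≤ e
    · rw [if_pos hc]
      by_cases hm : s + 1 ≤ (i : Int) ∧ (i : Int) ≤ e - 1
      · rw [if_pos hm, hL, if_neg (by omega), if_neg (by omega)]
        congr 1; omega
      · rw [if_neg hm, hL]
        by_cases hie : i = e.toNat
        · rw [if_pos hie, List.getD_eq_getElem _ _ (by omega : (s + e - (i:Int)).toNat < arr.length)]
          congr 1; omega
        · rw [if_neg hie, if_pos (by omega), List.getD_eq_getElem _ _ (by omega : (s + e - (i:Int)).toNat < arr.length)]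
          congr 1; omega
    · rw [if_neg hc, if_neg (by omega), hL, if_neg (by omega), if_neg (by omega)]
  | case2 arr s e h hnone =>
    intro h0 h2 i
    exfalso
    have he0 : (0:Int) ≤ e := by omega
    exact hnone (arr.getD s.toNat 0) (arr.getD e.toNat 0)
      (by rw [PySem.List.pyGet?_of_nonneg _ h0, List.getElem?_eq_getElem (by omega : s.toNat < arr.length)]
          rw [List.getD_eq_getElem _ _ (by omega : s.toNat < arr.length)])
      (by rw [PySem.List.pyGet?_of_nonneg _ he0, List.getElem?_eq_getElem (by omega : e.toNat < arr.length)]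
          rw [List.getD_eq_getElem _ _ (by omega : e.toNat < arr.length)])
  | case3 arr s e h =>
    intro h0 h2 i
    split_ifs with hi
    · congr 1; omega
    · rfl

-- ===== VERDICT (by name: the statement is the Claim_ definition above) =====
theorem left_rotate_inplace_spec : Claim_equal_left_rotate_inplace := by
  intro arr k _ hpre
  have hlen : 0 < arr.length := List.length_pos_of_ne_nil hpre
  have hNpos : (0:Int) < (arr.length : Int) := by omega
  unfold Spec_left_rotate_inplace left_rotate_inplace left_rotate_inplace_alt
  show (if (arr.length : Int) = 0 then arr else
          revSegA (revSegA (revSegA arr 0 (PySem.Int.mod k (arr.length : Int) - 1))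
            (PySem.Int.mod k (arr.length : Int)) ((arr.length : Int) - 1)) 0 ((arr.length : Int) - 1))
      = (if (arr.length : Int) = 0 then arr else
          PySem.List.slice arr (some (PySem.Int.mod k (arr.length : Int))) none ++
          PySem.List.slice arr none (some (PySem.Int.mod k (arr.length : Int))))
  rw [if_neg (by omega : ¬ ((arr.length : Int) = 0)), if_neg (by omega : ¬ ((arr.length : Int) = 0))]
  set K := PySem.Int.mod k (arr.length : Int) with hKdef
  have hK0 : 0 ≤ K := PySem.Int.mod_nonneg k hNpos
  have hKlt : K < (arr.length : Int) := PySem.Int.mod_lt k hNpos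
  have hKcast : K = ((K.toNat : Nat) : Int) := (Int.toNat_of_nonneg hK0).symm
  rw [show PySem.List.slice arr (some K) none = arr.drop K.toNat from by
        rw [hKcast, PySem.List.slice_from_natCast]; congr 1,
      show PySem.List.slice arr none (some K) = arr.take K.toNat from by
        rw [hKcast, PySem.List.slice_to_natCast]; congr 1]
  have l1 : (revSegA arr 0 (K - 1)).length = arr.length := revSegA_length _ _ _
  have l2 : (revSegA (revSegA arr 0 (K - 1)) K ((arr.length : Int) - 1)).length = arr.length := by
    rw [revSegA_length, l1]
  apply List.ext_getElem
  · simp [revSegA_length, l2]; omega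
  · intro i h1 h2
    rw [← List.getD_eq_getElem _ 0 h1, ← List.getD_eq_getElem _ 0 h2]
    have hi : i < arr.length := by
      rw [revSegA_length, l2] at h1; exact h1
    rw [revSegA_getD _ 0 ((arr.length : Int) - 1) (by omega) (by rw [l2]; omega) i,
        if_pos (by omega : (0:Int) ≤ (i:Int) ∧ (i:Int) ≤ (arr.length : Int) - 1)]
    set j : Nat := ((0:Int) + ((arr.length : Int) - 1) - i).toNat with hj
    have hjv : (j : Int) = (arr.length : Int) - 1 - i := by omega
    rw [revSegA_getD _ K ((arr.length : Int) - 1) hK0 (by rw [l1]; omega) j]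
    have hBget : (arr.drop K.toNat ++ arr.take K.toNat).getD i 0 =
        if i < arr.length - K.toNat then arr.getD (K.toNat + i) 0
        else arr.getD (i - (arr.length - K.toNat)) 0 := by
      simp only [List.getD, List.getElem?_append, List.length_drop, List.getElem?_drop,
        List.getElem?_take]
      split_ifs with c1 c2
      · rfl
      · rfl
      · exfalso; omega
    rw [hBget]
    by_cases hc : K ≤ (j : Int) ∧ (j : Int) ≤ (arr.length : Int) - 1
    · rw [if_pos hc, if_pos (by omega : i < arr.length - K.toNat)]
      rw [revSegA_getD arr 0 (K - 1) (le_refl 0) (by omega) ((K + ((arr.length : Int) - 1) - j).toNat),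
          if_neg (by omega)]
      congr 1; omega
    · rw [if_neg hc, if_neg (by omega : ¬ i < arr.length - K.toNat)]
      rw [revSegA_getD arr 0 (K - 1) (le_refl 0) (by omega) j,
          if_pos (by omega : (0:Int) ≤ (j:Int) ∧ (j:Int) ≤ K - 1)]
      congr 1; omega
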